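-- pv_equiv track=rewrite | github.com/noospheer/Liup | src/liuproto/link.py | _search_decode
-- ===== SOURCE A (Python) =====
-- _MERSENNE_61 = (1 << 61) - 1
--
-- def _its_mac_tag(coeffs, r, s):
--     """Wegman-Carter MAC: polynomial eval at r, OTP with s, mod 2^61-1."""
--     h = 0
--     for c in coeffs:
--         h = ((h * r) + c) % _MERSENNE_61
--     return (h + s) % _MERSENNE_61
--
-- def _search_decode(coeffs, r, s, target_tag, borderline_idx, delta_bins,
--                    r_powers, max_flip=8):
--     """Search decoder: flip borderline wrapping counts to match MAC tag.
--
--     Uses incremental tag updates: changing coefficient j by delta changes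
--     the polynomial hash by delta * r^(n-1-j).
--
--     Parameters
--     ----------
--     coeffs : list of int
--         Initial quantized bin indices.
--     r, s : int
--         Wegman-Carter MAC key components.
--     target_tag : int
--         Tag to match.
--     borderline_idx : list of int
--         Indices into coeffs of the most borderline steps, sorted by
--         ascending reliability (most ambiguous first).
--     delta_bins : list of int
--         For each borderline step, the bin index change if we flip the
--         wrapping count (can be positive or negative).
--     r_powers : list of int
--         Precomputed r^(n-1-j) mod M for each position j in coeffs.
--     max_flip : int
--         Maximum number of steps to try flipping (default 8 → 2^8 = 256).
--
--     Returns
--     -------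
--     list of int or None
--         Corrected coefficients if match found, else None.
--     """
--     M = _MERSENNE_61
--     K = min(len(borderline_idx), max_flip)
--     if K == 0:
--         return None
--
--     init_tag_no_s = (_its_mac_tag(coeffs, r, 0)) % M
--     target_no_s = (target_tag - s) % M
--
--     # Precompute tag deltas for each borderline position
--     tag_deltas = []
--     for i in range(K):
--         j = borderline_idx[i]
--         tag_deltas.append((delta_bins[i] * r_powers[j]) % M)
--
--     # Enumerate 2^K combinations (Gray code not needed for K <= 8)
--     for mask in range(1, 1 << K):
--         tag_mod = init_tag_no_s
--         for bit in range(K):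
--             if mask & (1 << bit):
--                 tag_mod = (tag_mod + tag_deltas[bit]) % M
--         if (tag_mod + s) % M == target_tag:
--             # Found match — apply corrections
--             corrected = list(coeffs)
--             for bit in range(K):
--                 if mask & (1 << bit):
--                     j = borderline_idx[bit]
--                     corrected[j] += delta_bins[bit]
--             return corrected
--
--     return None
-- ===== SOURCE B (Python) =====
-- _MERSENNE_61 = (1 << 61) - 1
--
-- def _its_mac_tag(coeffs, r, s):
--     """Wegman-Carter MAC: polynomial eval at r, OTP with s, mod 2^61-1."""
--     h = 0
--     for c in coeffs:
--         h = ((h * r) + c) % _MERSENNE_61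
--     return (h + s) % _MERSENNE_61
--
-- def _search_decode(coeffs, r, s, target_tag, borderline_idx, delta_bins,
--                    r_powers, max_flip=8):
--     """DP-table decoder: build all 2^K candidate tags once (each new
--     borderline bit doubles the table, appended as the most significant
--     bit, so the table is in ascending-mask order), then scan flat."""
--     M = _MERSENNE_61
--     K = min(len(borderline_idx), max_flip)
--
--     # cands[mask] = (tag without s, list of flipped borderline positions)
--     cands = [(_its_mac_tag(coeffs, r, 0) % M, [])]
--     for i in range(K):
--         d = (delta_bins[i] * r_powers[borderline_idx[i]]) % M
--         cands = cands + [((t + d) % M, f + [i]) for (t, f) in cands]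
--
--     for t, f in cands:
--         if f and (t + s) % M == target_tag:
--             corrected = list(coeffs)
--             for i in f:
--                 corrected[borderline_idx[i]] += delta_bins[i]
--             return corrected
--     return None
-- ===== Notes on version B (the rewrite author's own statement) =====
-- stated objective: faster
-- what changed: Instead of recomputing the tag for every mask with an inner O(K) bit loop, B builds a DP table of all 2^K subset tags once (each borderline step doubles the candidate list, in ascending-mask order) and then does one flat first-match scan. Pre_ restricts to the docstring's domain (max_flip >= 0, a delta_bins entry per borderline step, and each used borderline_idx entry a valid index into both r_powers and coeffs, since borderline_idx are documented as 'indices into coeffs'); …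
-- outside the precondition, e.g. on _search_decode([], 0, 0, 5, [0], [1], [1], 1): A returns None, B returns None; on _search_decode([1], 2, 0, 999, [5], [1], [7, 7, 7, 7, 7, 7], 1): A returns None, B returns None
import Mathlib
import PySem

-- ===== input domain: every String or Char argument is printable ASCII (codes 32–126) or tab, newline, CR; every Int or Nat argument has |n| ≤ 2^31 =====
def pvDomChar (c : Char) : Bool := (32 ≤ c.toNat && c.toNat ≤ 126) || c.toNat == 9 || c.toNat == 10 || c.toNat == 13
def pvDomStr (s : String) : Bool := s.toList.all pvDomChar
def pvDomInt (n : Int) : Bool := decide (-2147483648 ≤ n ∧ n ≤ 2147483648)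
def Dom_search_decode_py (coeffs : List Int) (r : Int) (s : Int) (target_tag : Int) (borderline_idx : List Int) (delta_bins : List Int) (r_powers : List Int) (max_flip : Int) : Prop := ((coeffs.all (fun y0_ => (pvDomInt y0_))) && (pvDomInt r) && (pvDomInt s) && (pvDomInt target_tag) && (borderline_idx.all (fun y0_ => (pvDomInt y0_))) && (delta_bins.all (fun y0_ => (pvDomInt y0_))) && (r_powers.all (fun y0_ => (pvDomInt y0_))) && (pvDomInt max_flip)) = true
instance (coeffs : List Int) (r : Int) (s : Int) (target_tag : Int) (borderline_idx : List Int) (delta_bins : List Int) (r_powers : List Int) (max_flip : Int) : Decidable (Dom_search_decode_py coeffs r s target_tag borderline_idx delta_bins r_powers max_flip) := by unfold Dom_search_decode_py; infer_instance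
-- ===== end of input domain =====

-- ===== PORT A =====
-- B replaces A's per-mask O(K) inner tag loop by a DP table of all 2^K subset tags built once, then a flat scan (same ascending-mask first-match order).

def pvM : Int := 2305843009213693951

-- shared module helper _its_mac_tag (both Pythons call it / its loop)
def pvMacTag (coeffs : List Int) (r s : Int) : Int :=
  PySem.Int.mod (coeffs.foldl (fun h c => PySem.Int.mod (h * r + c) pvM) 0 + s) pvM

-- semantics of `xs[j] += d` (Python index, possibly negative in-range)
def pvSetAdd (xs : List Int) (j d : Int) : List Int :=
  PySem.List.pySetD xs j ((PySem.List.pyGet? xs j).getD 0 + d)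

-- tag_deltas list built by A's append loop
def pvTagDeltas (borderline_idx delta_bins r_powers : List Int) (kn : Nat) : List Int :=
  (List.range kn).foldl (fun acc i =>
    acc ++ [PySem.Int.mod ((delta_bins.getD i 0) *
      ((PySem.List.pyGet? r_powers (borderline_idx.getD i 0)).getD 0)) pvM]) []

-- A's inner per-mask tag loop
def pvTagOf (tds : List Int) (kn mask : Nat) (init : Int) : Int :=
  (List.range kn).foldl
    (fun t bit => if mask &&& (1 <<< bit) != 0 then PySem.Int.mod (t + tds.getD bit 0) pvM else t) init

-- A's correction loop at a matching mask
def pvApplyA (coeffs borderline_idx delta_bins : List Int) (kn mask : Nat) : List Int :=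
  (List.range kn).foldl
    (fun cs bit => if mask &&& (1 <<< bit) != 0 then
        pvSetAdd cs (borderline_idx.getD bit 0) (delta_bins.getD bit 0) else cs) coeffs

-- A's mask loop with early return
def pvLoopA (coeffs borderline_idx delta_bins tds : List Int) (s target_tag init : Int)
    (kn : Nat) : List Nat → Option (List Int)
  | [] => none
  | mask :: rest =>
    if PySem.Int.mod (pvTagOf tds kn mask init + s) pvM = target_tag then
      some (pvApplyA coeffs borderline_idx delta_bins kn mask)
    else pvLoopA coeffs borderline_idx delta_bins tds s target_tag init kn rest

def search_decode_py (coeffs : List Int) (r : Int) (s : Int) (target_tag : Int) (borderline_idx : List Int) (delta_bins : List Int) (r_powers : List Int) (max_flip : Int) : Option (List Int) :=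
  let K : Int := min (borderline_idx.length : Int) max_flip
  if K = 0 then none
  else
    let kn := K.toNat
    let init := PySem.Int.mod (pvMacTag coeffs r 0) pvM
    let _target_no_s := PySem.Int.mod (target_tag - s) pvM  -- computed and unused, as in A
    let tds := pvTagDeltas borderline_idx delta_bins r_powers kn
    pvLoopA coeffs borderline_idx delta_bins tds s target_tag init kn
      (List.range' 1 (2 ^ kn - 1))

-- ===== PORT B =====

-- the DP table: each borderline bit doubles the candidate list (appended as the most significant bit)
def pvCandsB (borderline_idx delta_bins r_powers : List Int) (init : Int) (kn : Nat) :
    List (Int × List Nat) :=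
  (List.range kn).foldl (fun acc i =>
    let d := PySem.Int.mod ((delta_bins.getD i 0) *
      ((PySem.List.pyGet? r_powers (borderline_idx.getD i 0)).getD 0)) pvM
    acc ++ acc.map (fun p => (PySem.Int.mod (p.1 + d) pvM, p.2 ++ [i]))) [(init, [])]

-- B's flat scan over the table
def pvScanB (coeffs borderline_idx delta_bins : List Int) (s target_tag : Int) :
    List (Int × List Nat) → Option (List Int)
  | [] => none
  | (t, f) :: rest =>
    if f ≠ [] ∧ PySem.Int.mod (t + s) pvM = target_tag then
      some (f.foldl (fun cs i =>
        pvSetAdd cs (borderline_idx.getD i 0) (delta_bins.getD i 0)) coeffs)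
    else pvScanB coeffs borderline_idx delta_bins s target_tag rest

def search_decode_py_alt (coeffs : List Int) (r : Int) (s : Int) (target_tag : Int) (borderline_idx : List Int) (delta_bins : List Int) (r_powers : List Int) (max_flip : Int) : Option (List Int) :=
  let kn := (min (borderline_idx.length : Int) max_flip).toNat
  let init := PySem.Int.mod (pvMacTag coeffs r 0) pvM
  pvScanB coeffs borderline_idx delta_bins s target_tag
    (pvCandsB borderline_idx delta_bins r_powers init kn)

-- ===== PRECONDITION & SPEC =====
-- Pre_ restricts to the docstring's domain: max_flip ≥ 0 (else `1 << K` raises ValueError), a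
-- delta_bins entry and a valid r_powers index per used borderline step (else the precompute loop
-- raises IndexError), and each used borderline_idx entry a valid index into coeffs — borderline_idx
-- is documented as "Indices into coeffs", and outside that contract A raises IndexError whenever a
-- matching mask is found (it still returns None when none matches; those inputs are among the
-- excluded ones, see the cites).
def Pre_search_decode_py (coeffs : List Int) (r : Int) (s : Int) (target_tag : Int) (borderline_idx : List Int) (delta_bins : List Int) (r_powers : List Int) (max_flip : Int) : Prop :=
  0 ≤ max_flip ∧
  ∀ i < min borderline_idx.length max_flip.toNat,
    i < delta_bins.length ∧
    -(r_powers.length : Int) ≤ borderline_idx.getD i 0 ∧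
    borderline_idx.getD i 0 < (r_powers.length : Int) ∧
    -(coeffs.length : Int) ≤ borderline_idx.getD i 0 ∧
    borderline_idx.getD i 0 < (coeffs.length : Int)
instance (coeffs : List Int) (r : Int) (s : Int) (target_tag : Int) (borderline_idx : List Int) (delta_bins : List Int) (r_powers : List Int) (max_flip : Int) : Decidable (Pre_search_decode_py coeffs r s target_tag borderline_idx delta_bins r_powers max_flip) := by unfold Pre_search_decode_py; infer_instance

def pvWitness_search_decode_py : List Int × Int × Int × Int × List Int × List Int × List Int × Int :=
  ([7, 3], 2, 5, 19, [1], [1], [2, 1], 1)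

def Spec_search_decode_py (coeffs : List Int) (r : Int) (s : Int) (target_tag : Int) (borderline_idx : List Int) (delta_bins : List Int) (r_powers : List Int) (max_flip : Int) (out : Option (List Int)) : Prop := out = search_decode_py_alt coeffs r s target_tag borderline_idx delta_bins r_powers max_flip
instance (coeffs : List Int) (r : Int) (s : Int) (target_tag : Int) (borderline_idx : List Int) (delta_bins : List Int) (r_powers : List Int) (max_flip : Int) (out : Option (List Int)) : Decidable (Spec_search_decode_py coeffs r s target_tag borderline_idx delta_bins r_powers max_flip out) := by unfold Spec_search_decode_py; infer_instance

-- ===== CLAIM (what is proved, stated in full; the proofs are below) =====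
def Claim_equal_search_decode_py : Prop := ∀ (coeffs : List Int) (r : Int) (s : Int) (target_tag : Int) (borderline_idx : List Int) (delta_bins : List Int) (r_powers : List Int) (max_flip : Int), Dom_search_decode_py coeffs r s target_tag borderline_idx delta_bins r_powers max_flip → Pre_search_decode_py coeffs r s target_tag borderline_idx delta_bins r_powers max_flip → Spec_search_decode_py coeffs r s target_tag borderline_idx delta_bins r_powers max_flip (search_decode_py coeffs r s target_tag borderline_idx delta_bins r_powers max_flip)

-- ===== LEMMAS AND PROOFS =====

-- abstract forms of the two programs' loops, over a delta function dF
def pvTagF (dF : Nat → Int) (kn mask : Nat) (init : Int) : Int :=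
  (List.range kn).foldl
    (fun t bit => if mask &&& (1 <<< bit) != 0 then PySem.Int.mod (t + dF bit) pvM else t) init

def pvBits (kn mask : Nat) : List Nat :=
  (List.range kn).filter (fun b => mask &&& (1 <<< b) != 0)

lemma pvBit_high (kn m : Nat) (hm : m < 2 ^ kn) : (m &&& (1 <<< kn) != 0) = false := by
  simp [Nat.one_shiftLeft, Nat.and_two_pow, Nat.testBit_lt_two_pow hm]

lemma pvBit_add_low (kn m b : Nat) (hb : b < kn) :
    ((2 ^ kn + m) &&& (1 <<< b)) = (m &&& (1 <<< b)) := by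
  simp [Nat.one_shiftLeft, Nat.and_two_pow, Nat.testBit_two_pow_add_gt hb m]

lemma pvBit_add_high (kn m : Nat) (hm : m < 2 ^ kn) :
    ((2 ^ kn + m) &&& (1 <<< kn) != 0) = true := by
  simp [Nat.one_shiftLeft, Nat.and_two_pow, Nat.testBit_two_pow_add_eq,
    Nat.testBit_lt_two_pow hm]

lemma pvTagF_high (dF : Nat → Int) (kn m : Nat) (init : Int) (hm : m < 2 ^ kn) :
    pvTagF dF (kn + 1) m init = pvTagF dF kn m init := by
  unfold pvTagF
  rw [List.range_succ, List.foldl_append]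
  simp only [List.foldl_cons, List.foldl_nil]
  rw [pvBit_high kn m hm]
  simp

lemma pvTagF_add (dF : Nat → Int) (kn m : Nat) (init : Int) (hm : m < 2 ^ kn) :
    pvTagF dF (kn + 1) (2 ^ kn + m) init = PySem.Int.mod (pvTagF dF kn m init + dF kn) pvM := by
  unfold pvTagF
  rw [List.range_succ, List.foldl_append,
    PySem.List.foldl_congr_mem (List.range kn) _
      (fun t bit => if m &&& (1 <<< bit) != 0 then PySem.Int.mod (t + dF bit) pvM else t) init
      (fun acc b hb => by rw [pvBit_add_low kn m b (List.mem_range.mp hb)])]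
  simp only [List.foldl_cons, List.foldl_nil]
  rw [pvBit_add_high kn m hm]
  simp

lemma pvBits_high (kn m : Nat) (hm : m < 2 ^ kn) : pvBits (kn + 1) m = pvBits kn m := by
  simp [pvBits, List.range_succ, List.filter_append, pvBit_high kn m hm]

lemma pvBits_add (kn m : Nat) (hm : m < 2 ^ kn) :
    pvBits (kn + 1) (2 ^ kn + m) = pvBits kn m ++ [kn] := by
  unfold pvBits
  rw [List.range_succ, List.filter_append]
  simp only [List.filter_cons, pvBit_add_high kn m hm, if_true, List.filter_nil]
  congr 1
  apply List.filter_congr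
  intro b hb
  rw [pvBit_add_low kn m b (List.mem_range.mp hb)]

-- the DP table is exactly the per-mask tag/bit-list table, in ascending-mask order
lemma pvCands_abstract (dF : Nat → Int) (init : Int) (kn : Nat) :
    (List.range kn).foldl (fun acc i =>
        acc ++ acc.map (fun p => (PySem.Int.mod (p.1 + dF i) pvM, p.2 ++ [i]))) [(init, [])]
    = (List.range (2 ^ kn)).map (fun m => (pvTagF dF kn m init, pvBits kn m)) := by
  induction kn with
  | zero => simp [pvTagF, pvBits]
  | succ kn ih =>
    rw [List.range_succ, List.foldl_append, ih]
    have h2 : 2 ^ (kn + 1) = 2 ^ kn + 2 ^ kn := by ring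
    rw [h2, List.range_add, List.map_append, List.map_map, List.foldl_cons, List.foldl_nil,
      List.map_map]
    refine congrArg₂ (· ++ ·) (List.map_congr_left ?_) (List.map_congr_left ?_)
    · intro m hm
      have hm' := List.mem_range.mp hm
      rw [pvTagF_high dF kn m init hm', pvBits_high kn m hm']
    · intro m hm
      have hm' := List.mem_range.mp hm
      simp only [Function.comp_apply]
      rw [pvTagF_add dF kn m init hm', pvBits_add kn m hm']

lemma pvBits_ne_nil (kn m : Nat) (h1 : 1 ≤ m) (h2 : m < 2 ^ kn) : pvBits kn m ≠ [] := by
  intro h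
  have hall : ∀ b, m.testBit b = false := by
    intro b
    by_cases hb : b < kn
    · have h3 := List.filter_eq_nil_iff.mp h b (List.mem_range.mpr hb)
      simpa [Nat.one_shiftLeft, Nat.and_two_pow] using h3
    · exact Nat.testBit_lt_two_pow (lt_of_lt_of_le h2 (Nat.pow_le_pow_right (by norm_num) (le_of_not_gt hb)))
  have hm0 : m = 0 := Nat.eq_of_testBit_eq (fun i => by simp [hall])
  omega

-- A's guarded fold over range kn = fold over the bit list
lemma pvApplyA_eq_bits (coeffs borderline_idx delta_bins : List Int) (kn mask : Nat) :
    pvApplyA coeffs borderline_idx delta_bins kn mask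
    = (pvBits kn mask).foldl (fun cs i =>
        pvSetAdd cs (borderline_idx.getD i 0) (delta_bins.getD i 0)) coeffs := by
  unfold pvApplyA pvBits
  rw [List.foldl_filter]

-- A's tag loop with the materialised tds list = abstract tag with the delta function
lemma pvTagOf_eq_tagF (borderline_idx delta_bins r_powers : List Int) (kn mask : Nat) (init : Int) :
    pvTagOf (pvTagDeltas borderline_idx delta_bins r_powers kn) kn mask init
    = pvTagF (fun i => PySem.Int.mod ((delta_bins.getD i 0) *
        ((PySem.List.pyGet? r_powers (borderline_idx.getD i 0)).getD 0)) pvM) kn mask init := by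
  unfold pvTagOf pvTagF pvTagDeltas
  rw [PySem.List.foldl_append_singleton_eq_map]
  exact PySem.List.foldl_congr_mem _ _ _ _ (fun acc b hb => by
    have hb' := List.mem_range.mp hb
    simp [List.getD_eq_getElem?_getD, hb'])

-- scanning the mapped table over any mask list of nonzero in-range masks = A's loop
lemma pvScan_eq_loopA (coeffs borderline_idx delta_bins r_powers : List Int)
    (s target_tag init : Int) (kn : Nat) (l : List Nat)
    (hl : ∀ m ∈ l, 1 ≤ m ∧ m < 2 ^ kn) :
    pvScanB coeffs borderline_idx delta_bins s target_tag
      (l.map (fun m => (pvTagF (fun i => PySem.Int.mod ((delta_bins.getD i 0) *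
        ((PySem.List.pyGet? r_powers (borderline_idx.getD i 0)).getD 0)) pvM) kn m init, pvBits kn m)))
    = pvLoopA coeffs borderline_idx delta_bins
        (pvTagDeltas borderline_idx delta_bins r_powers kn) s target_tag init kn l := by
  induction l with
  | nil => rfl
  | cons m rest ih =>
    have hm := hl m (List.mem_cons_self ..)
    have hne := pvBits_ne_nil kn m hm.1 hm.2
    simp only [List.map_cons, pvScanB, pvLoopA]
    rw [pvTagOf_eq_tagF borderline_idx delta_bins r_powers kn m init]
    by_cases hP : PySem.Int.mod (pvTagF (fun i => PySem.Int.mod ((delta_bins.getD i 0) *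
        ((PySem.List.pyGet? r_powers (borderline_idx.getD i 0)).getD 0)) pvM) kn m init + s) pvM
        = target_tag
    · rw [if_pos ⟨hne, hP⟩, if_pos hP, pvApplyA_eq_bits]
    · rw [if_neg (fun hc => hP hc.2), if_neg hP]
      exact ih (fun x hx => hl x (List.mem_cons_of_mem _ hx))

lemma pvRange_split (kn : Nat) :
    List.range (2 ^ kn) = 0 :: List.range' 1 (2 ^ kn - 1) := by
  have h : 2 ^ kn = (2 ^ kn - 1) + 1 := by
    have := Nat.one_le_two_pow (n := kn); omega
  rw [List.range_eq_range', h, List.range'_succ]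
  simp

lemma pvBits_zero (kn : Nat) : pvBits kn 0 = [] := by
  simp [pvBits]

lemma pvCandsB_eq (borderline_idx delta_bins r_powers : List Int) (init : Int) (kn : Nat) :
    pvCandsB borderline_idx delta_bins r_powers init kn
    = (List.range (2 ^ kn)).map (fun m => (pvTagF (fun i => PySem.Int.mod ((delta_bins.getD i 0) *
        ((PySem.List.pyGet? r_powers (borderline_idx.getD i 0)).getD 0)) pvM) kn m init,
        pvBits kn m)) :=
  pvCands_abstract _ init kn

-- ===== VERDICT (by name: the statement is the Claim_ definition above) =====
theorem search_decode_py_spec : Claim_equal_search_decode_py := by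
  intro coeffs r s target_tag borderline_idx delta_bins r_powers max_flip _hdom _hpre
  unfold Spec_search_decode_py search_decode_py search_decode_py_alt
  by_cases hz : min (borderline_idx.length : Int) max_flip = 0
  · have h0 : (min (borderline_idx.length : Int) max_flip).toNat = 0 := by omega
    simp only [hz, h0, if_pos]
    simp [pvCandsB, pvScanB]
  · simp only [if_neg hz]
    rw [pvCandsB_eq, pvRange_split, List.map_cons]
    simp only [pvScanB]
    rw [if_neg (by simp [pvBits_zero])]
    exact (pvScan_eq_loopA coeffs borderline_idx delta_bins r_powers s target_tag
      (PySem.Int.mod (pvMacTag coeffs r 0) pvM)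
      ((min (borderline_idx.length : Int) max_flip).toNat)
      (List.range' 1 (2 ^ (min (borderline_idx.length : Int) max_flip).toNat - 1))
      (fun m hm => by
        have h' := List.mem_range'_1.mp hm
        have h1 : 1 ≤ 2 ^ (min (borderline_idx.length : Int) max_flip).toNat :=
          Nat.one_le_two_pow
        omega)).symm
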